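-- pv_equiv track=rewrite | github.com/Max4kaz/HW001 | 02_Семинары/Seminar004.py | less_common_div
-- ===== SOURCE A (Python) =====
-- def less_common_div(first_number: int, second_number: int) -> int:
--     if first_number < second_number:
--         temp = first_number
--         first_number = second_number
--         second_number = temp
--     for i in range(2, first_number + 1):
--         if (first_number % i == 0) and (i % second_number % i == 0):
--             return i
--     return None
-- ===== SOURCE B (Python) =====
-- def less_common_div(first_number: int, second_number: int) -> int:
--     if first_number < second_number:
--         first_number, second_number = second_number, first_number
--     divisors = []
--     d = 1
--     while d * d <= first_number:
--         if first_number % d == 0: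
--             divisors.append(d)
--             divisors.append(first_number // d)
--         d += 1
--     candidates = [i for i in divisors if i >= 2 and i % second_number % i == 0]
--     return min(candidates) if candidates else None
-- ===== Notes on version B (the rewrite author's own statement) =====
-- stated objective: faster
-- what changed: A scans every i from 2 up to the larger number and returns on the first hit; B enumerates the divisor pairs (d, n//d) of the larger number with a d*d<=n loop, filters them by the same candidate test, and returns the minimum.
-- outside the precondition, e.g. on less_common_div(7, 0): A raises ZeroDivisionError, B raises ZeroDivisionError
import Mathlib
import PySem

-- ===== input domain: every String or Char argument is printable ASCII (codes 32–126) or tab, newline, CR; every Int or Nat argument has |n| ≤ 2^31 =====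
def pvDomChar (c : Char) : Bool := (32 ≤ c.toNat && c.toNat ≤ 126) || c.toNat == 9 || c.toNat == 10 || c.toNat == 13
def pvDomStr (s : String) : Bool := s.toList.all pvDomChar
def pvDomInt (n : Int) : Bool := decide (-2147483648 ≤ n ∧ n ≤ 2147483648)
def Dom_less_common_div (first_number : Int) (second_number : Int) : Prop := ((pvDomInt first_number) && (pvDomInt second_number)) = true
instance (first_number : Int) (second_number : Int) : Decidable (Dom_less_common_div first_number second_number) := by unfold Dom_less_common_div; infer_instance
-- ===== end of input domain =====

-- B replaces A's linear scan over 2..first_number by a sqrt-bounded enumeration of the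
-- divisor pairs of the larger number, then takes the minimum of the candidates (objective: faster worst case).

-- ===== PORT A =====
-- A-side helper: the `for i in range(2, F+1)` loop with its early return, iterated lazily
-- exactly as Python's range is (first i with F % i == 0 and i % S % i == 0, else None).
def lcdScan (F : Int) (S : Int) (i : Int) : Option Int :=
  if _h : i < F + 1 then
    if PySem.Int.mod F i == 0 && PySem.Int.mod (PySem.Int.mod i S) i == 0 then some i
    else lcdScan F S (i + 1)
  else none
  termination_by (F + 1 - i).toNat

-- literal transliteration of A: swap so first_number is the larger, then run the scan from 2.
def less_common_div (first_number : Int) (second_number : Int) : Option Int :=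
  let F : Int := if first_number < second_number then second_number else first_number
  let S : Int := if first_number < second_number then first_number else second_number
  lcdScan F S 2

-- ===== PORT B =====
-- B-side helper: the `while d * d <= F` loop collecting divisor pairs (d, F // d).
def lcdCollect (F : Int) (d : Int) (acc : List Int) : List Int :=
  if _h : d * d ≤ F then
    lcdCollect F (d + 1)
      (acc ++ (if PySem.Int.mod F d == 0 then [d, PySem.Int.floordiv F d] else []))
  else acc
  termination_by (F + 1 - d).toNat
  decreasing_by
    have hd : d ≤ F := by nlinarith [mul_self_nonneg d]
    omega

def less_common_div_alt (first_number : Int) (second_number : Int) : Option Int :=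
  let F : Int := if first_number < second_number then second_number else first_number
  let S : Int := if first_number < second_number then first_number else second_number
  let divisors := lcdCollect F 1 []
  let candidates := divisors.filter (fun i => 2 ≤ i && PySem.Int.mod (PySem.Int.mod i S) i == 0)
  PySem.List.min? candidates (fun x => x)

-- ===== PRECONDITION & SPEC =====
-- Pre_ excludes exactly the inputs where A raises ZeroDivisionError: the smaller number is 0
-- and the larger is ≥ 2 (then the scan reaches a divisor i and evaluates i % 0).
def Pre_less_common_div (first_number : Int) (second_number : Int) : Prop :=
  ¬ ((if first_number < second_number then first_number else second_number) = 0 ∧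
     2 ≤ (if first_number < second_number then second_number else first_number))
instance (first_number : Int) (second_number : Int) : Decidable (Pre_less_common_div first_number second_number) := by
  unfold Pre_less_common_div; infer_instance

def pvWitness_less_common_div : Int × Int := (12, 4)

def Spec_less_common_div (first_number : Int) (second_number : Int) (out : Option Int) : Prop :=
  out = less_common_div_alt first_number second_number
instance (first_number : Int) (second_number : Int) (out : Option Int) : Decidable (Spec_less_common_div first_number second_number out) := by
  unfold Spec_less_common_div; infer_instance

-- ===== CLAIM (what is proved, stated in full; the proofs are below) =====
def Claim_equal_less_common_div : Prop := ∀ (first_number : Int) (second_number : Int), Dom_less_common_div first_number second_number → Pre_less_common_div first_number second_number → Spec_less_common_div first_number second_number (less_common_div first_number second_number)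

-- ===== LEMMAS AND PROOFS =====

-- find? on a strictly increasing list returns a minimal satisfying element.
theorem find?_min_of_pairwise {p : Int → Bool} {l : List Int} {m : Int}
    (hp : l.Pairwise (· < ·)) (hf : l.find? p = some m) :
    ∀ x ∈ l, p x = true → m ≤ x := by
  induction l with
  | nil => simp at hf
  | cons a t ih =>
    rw [List.pairwise_cons] at hp
    by_cases ha : p a = true
    · rw [List.find?_cons_of_pos ha] at hf
      cases hf
      intro x hx _
      rcases List.mem_cons.mp hx with rfl | hx
      · exact le_refl _
      · exact le_of_lt (hp.1 x hx)
    · rw [List.find?_cons_of_neg (by simpa using ha)] at hf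
      intro x hx hpx
      rcases List.mem_cons.mp hx with rfl | hx
      · exact absurd hpx ha
      · exact ih hp.2 hf x hx hpx

-- the scan loop is find? over the materialized range
theorem lcdScan_eq_find? (F S : Int) : ∀ i, lcdScan F S i =
    (PySem.List.pyRange i (F + 1) 1).find?
      (fun j => PySem.Int.mod F j == 0 && PySem.Int.mod (PySem.Int.mod j S) j == 0) := by
  intro i
  induction i using lcdScan.induct F S with
  | case1 i hlt hcond =>
    rw [lcdScan, dif_pos hlt, if_pos hcond, PySem.List.pyRange_one_cons (by omega)]
    simp [hcond]
  | case2 i hlt hcond ih =>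
    rw [lcdScan, dif_pos hlt, if_neg hcond, PySem.List.pyRange_one_cons (by omega)]
    rw [Bool.not_eq_true] at hcond
    simp [hcond, ih]
  | case3 i hlt =>
    rw [lcdScan, dif_neg hlt, PySem.List.pyRange_one_eq_nil (by omega), List.find?_nil]

-- membership in the collector loop
theorem mem_lcdCollect {F : Int} {i : Int} : ∀ (c : Int) (acc : List Int), 1 ≤ c →
    (i ∈ lcdCollect F c acc ↔ i ∈ acc ∨ ∃ d, c ≤ d ∧ d * d ≤ F ∧ PySem.Int.mod F d = 0 ∧
      (i = d ∨ i = PySem.Int.floordiv F d)) := by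
  intro c acc
  induction c, acc using lcdCollect.induct F with
  | case1 d acc hdd ih =>
    intro hd1
    have ih' := ih (by omega)
    simp only [dite_eq_ite] at ih'
    rw [lcdCollect, dif_pos hdd, ih']
    constructor
    · rintro (hmem | ⟨e, he1, he2, he3, he4⟩)
      · rcases List.mem_append.mp hmem with hmem | hmem
        · exact Or.inl hmem
        · by_cases hmod : (PySem.Int.mod F d == 0) = true
          · rw [if_pos hmod] at hmem
            rcases List.mem_cons.mp hmem with heq | hmem
            · exact Or.inr ⟨d, le_refl _, hdd, by simpa using hmod, Or.inl heq⟩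
            · rcases List.mem_cons.mp hmem with heq | hmem
              · exact Or.inr ⟨d, le_refl _, hdd, by simpa using hmod, Or.inr heq⟩
              · simp at hmem
          · rw [if_neg hmod] at hmem
            simp at hmem
      · exact Or.inr ⟨e, by omega, he2, he3, he4⟩
    · rintro (hmem | ⟨e, he1, he2, he3, he4⟩)
      · exact Or.inl (List.mem_append.mpr (Or.inl hmem))
      · by_cases hed : e = d
        · subst hed
          refine Or.inl (List.mem_append.mpr (Or.inr ?_))
          have hmod : (PySem.Int.mod F e == 0) = true := by simpa using he3
          rw [if_pos hmod]
          rcases he4 with rfl | heq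
          · simp
          · simp [heq]
        · exact Or.inr ⟨e, by omega, he2, he3, he4⟩
  | case2 d acc hdd =>
    intro hd1
    rw [lcdCollect, dif_neg hdd]
    constructor
    · exact Or.inl
    · rintro (hmem | ⟨e, he1, he2, he3, he4⟩)
      · exact hmem
      · have : d * d ≤ e * e := by nlinarith
        omega

-- for F ≥ 1 the collector from 1 lists exactly the positive divisors of F
theorem mem_lcdCollect_one {F i : Int} (hF : 1 ≤ F) :
    i ∈ lcdCollect F 1 [] ↔ 1 ≤ i ∧ i ∣ F := by
  rw [mem_lcdCollect 1 [] (le_refl 1)]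
  simp only [List.not_mem_nil, false_or]
  constructor
  · rintro ⟨d, hd1, hdd, hmod, hi⟩
    have hdvd : d ∣ F := (PySem.Int.mod_eq_zero_iff_dvd F d).mp hmod
    obtain ⟨k, hk⟩ := hdvd
    have hk1 : 1 ≤ k := by nlinarith
    rcases hi with rfl | rfl
    · exact ⟨hd1, ⟨k, hk⟩⟩
    · have hfd : PySem.Int.floordiv F d = k := by
        rw [PySem.Int.floordiv_eq_ediv_of_pos (by omega), hk,
          Int.mul_ediv_cancel_left k (by omega)]
      rw [hfd]
      exact ⟨hk1, ⟨d, by rw [hk]; ring⟩⟩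
  · rintro ⟨hi1, hidvd⟩
    obtain ⟨k, hk⟩ := hidvd
    have hk1 : 1 ≤ k := by nlinarith
    by_cases h : i * i ≤ F
    · exact ⟨i, hi1, h, (PySem.Int.mod_eq_zero_iff_dvd F i).mpr ⟨k, hk⟩, Or.inl rfl⟩
    · have hki : k ≤ i := by nlinarith
      refine ⟨k, hk1, by nlinarith,
        (PySem.Int.mod_eq_zero_iff_dvd F k).mpr ⟨i, by rw [hk]; ring⟩, Or.inr ?_⟩
      rw [PySem.Int.floordiv_eq_ediv_of_pos (by omega), hk, mul_comm,
        Int.mul_ediv_cancel_left i (by omega)]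

-- the candidate predicate both programs test, after the swap
theorem main_equal (F S : Int) (hPre : ¬ (S = 0 ∧ 2 ≤ F)) :
    lcdScan F S 2 =
    PySem.List.min?
      ((lcdCollect F 1 []).filter (fun i => 2 ≤ i && PySem.Int.mod (PySem.Int.mod i S) i == 0))
      (fun x => x) := by
  rw [lcdScan_eq_find?]
  by_cases hF : 2 ≤ F
  · -- F ≥ 2
    have hS : S ≠ 0 := fun h => hPre ⟨h, hF⟩
    set p : Int → Bool := fun i => PySem.Int.mod F i == 0 && PySem.Int.mod (PySem.Int.mod i S) i == 0 with hp
    set q : Int → Bool := fun i => 2 ≤ i && PySem.Int.mod (PySem.Int.mod i S) i == 0 with hq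
    have hmemfilter : ∀ x, x ∈ (lcdCollect F 1 []).filter q ↔
        (2 ≤ x ∧ x ∣ F ∧ PySem.Int.mod (PySem.Int.mod x S) x = 0) := by
      intro x
      rw [List.mem_filter, mem_lcdCollect_one (by omega)]
      simp only [hq, Bool.and_eq_true, decide_eq_true_eq, beq_iff_eq]
      constructor
      · rintro ⟨⟨h1, h2⟩, h3, h4⟩
        exact ⟨h3, h2, h4⟩
      · rintro ⟨h3, h2, h4⟩
        exact ⟨⟨by omega, h2⟩, h3, h4⟩
    cases hfind : (PySem.List.pyRange 2 (F + 1) 1).find? p with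
    | none =>
      have hnone := List.find?_eq_none.mp hfind
      symm
      rw [PySem.List.min?_eq_none_iff]
      rw [List.eq_nil_iff_forall_not_mem]
      intro x hx
      rw [hmemfilter] at hx
      obtain ⟨hx2, hxdvd, hxc⟩ := hx
      have hxF : x ≤ F := Int.le_of_dvd (by omega) hxdvd
      have hxmem : x ∈ PySem.List.pyRange 2 (F + 1) 1 := by
        rw [PySem.List.mem_pyRange_one]; omega
      apply hnone x hxmem
      simp only [hp, Bool.and_eq_true, beq_iff_eq]
      exact ⟨(PySem.Int.mod_eq_zero_iff_dvd F x).mpr hxdvd, hxc⟩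
    | some m =>
      have hpm : p m = true := List.find?_some hfind
      have hmmem : m ∈ PySem.List.pyRange 2 (F + 1) 1 := List.mem_of_find?_eq_some hfind
      have hmrange := (PySem.List.mem_pyRange_one).mp hmmem
      have hmin : ∀ x ∈ PySem.List.pyRange 2 (F + 1) 1, p x = true → m ≤ x :=
        find?_min_of_pairwise (PySem.List.pairwise_lt_pyRange_one 2 (F+1)) hfind
      simp only [hp, Bool.and_eq_true, beq_iff_eq] at hpm
      have hmdvd : m ∣ F := (PySem.Int.mod_eq_zero_iff_dvd F m).mp hpm.1
      have hmfilter : m ∈ (lcdCollect F 1 []).filter q := by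
        rw [hmemfilter]; exact ⟨by omega, hmdvd, hpm.2⟩
      -- min? of the filtered list is some m
      cases hmin? : PySem.List.min? ((lcdCollect F 1 []).filter q) (fun x => x) with
      | none =>
        rw [PySem.List.min?_eq_none_iff] at hmin?
        rw [hmin?] at hmfilter
        simp at hmfilter
      | some m' =>
        have hm'mem := PySem.List.min?_mem hmin?
        have hm'min := PySem.List.min?_isMin hmin?
        rw [hmemfilter] at hm'mem
        obtain ⟨hm'2, hm'dvd, hm'c⟩ := hm'mem
        have hm'F : m' ≤ F := Int.le_of_dvd (by omega) hm'dvd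
        have h1 : m ≤ m' := by
          apply hmin m'
          · rw [PySem.List.mem_pyRange_one]; omega
          · simp only [hp, Bool.and_eq_true, beq_iff_eq]
            exact ⟨(PySem.Int.mod_eq_zero_iff_dvd F m').mpr hm'dvd, hm'c⟩
        have h2 : m' ≤ m := hm'min m hmfilter
        have : m = m' := le_antisymm h1 h2
        rw [this]
  · -- F < 2: range empty; filtered list empty
    have h1 : PySem.List.pyRange 2 (F + 1) 1 = [] := PySem.List.pyRange_one_eq_nil (by omega)
    rw [h1]
    simp only [List.find?_nil]
    symm
    rw [PySem.List.min?_eq_none_iff, List.eq_nil_iff_forall_not_mem]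
    intro x hx
    rw [List.mem_filter] at hx
    by_cases hF1 : 1 ≤ F
    · have := (mem_lcdCollect_one (F := F) (i := x) hF1).mp hx.1
      have hxF : x ≤ F := Int.le_of_dvd (by omega) this.2
      have hx2 : (2:Int) ≤ x := by
        have := hx.2
        simp only [Bool.and_eq_true, decide_eq_true_eq] at this
        exact this.1
      omega
    · have : lcdCollect F 1 [] = [] := by
        rw [lcdCollect, dif_neg (by omega)]
      rw [this] at hx
      simp at hx

-- ===== VERDICT (by name: the statement is the Claim_ definition above) =====
theorem less_common_div_spec : Claim_equal_less_common_div := by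
  intro f s _ hPre
  unfold Spec_less_common_div less_common_div less_common_div_alt
  simp only []
  exact main_equal _ _ (by unfold Pre_less_common_div at hPre; exact hPre)
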